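-- pv_equiv track=rewrite | github.com/kitgore/CS-115-Intro | hw/hw6.py | isSloppilySorted
-- ===== SOURCE A (Python) =====
-- def isSloppilySorted(arr, k):
--     """
--     Return True if-and-only-if the entries in arr are sorted sloppily
--     "up to k", that is, every entry precedes at most k smaller values
--      and follows at most k larger values.
--
--     Sample input/outputs:
--     * isSloppilySorted([3, 2, 1, 0, 4, 8, 7, 6, 5], 3) --> True
--     * isSloppilySorted([3, 2, 1, 0, 4, 8, 7, 6, 5], 2) --> False
--     * isSloppilySorted([0, 1, 2, 3, 4, 5, 6, 7, 8], 1) --> True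
--     * isSloppilySorted([], 3)                          --> True
--     """
--     for i in range(len(arr)):
--         countbefore = 0
--         countafter = 0
--         #done for loop counts before
--         for j in range(i):
--             if arr[j] > arr[i]:
--                 countbefore += 1
--
--         #done for loop counts after
--         for j in range(i, (len(arr))):
--             if arr[j] < arr[i]:
--                 countafter += 1
--
--         #return false if counts greater than k
--         if(countbefore > k) or (countafter > k):
--             return False
--     return True
-- ===== SOURCE B (Python) =====
-- def isSloppilySorted(arr, k):
--     # Two sweeps over a sorted auxiliary list instead of nested scans:
--     # forward, count earlier-larger via bisect_right; backward, count
--     # later-smaller via bisect_left.  (Hand-written bisect: no imports.)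
--     def _bisect_right(a, x):
--         lo, hi = 0, len(a)
--         while lo < hi:
--             mid = (lo + hi) // 2
--             if x < a[mid]:
--                 hi = mid
--             else:
--                 lo = mid + 1
--         return lo
--
--     def _bisect_left(a, x):
--         lo, hi = 0, len(a)
--         while lo < hi:
--             mid = (lo + hi) // 2
--             if a[mid] < x:
--                 lo = mid + 1
--             else:
--                 hi = mid
--         return lo
--
--     seen = []
--     for x in arr:
--         pos = _bisect_right(seen, x)
--         if len(seen) - pos > k:      # earlier elements strictly greater than x
--             return False
--         seen[pos:pos] = [x]
--     seen = []
--     for x in reversed(arr):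
--         pos = _bisect_left(seen, x)
--         if pos > k:                  # later elements strictly smaller than x
--             return False
--         seen[pos:pos] = [x]
--     return True
-- ===== Notes on version B (the rewrite author's own statement) =====
-- stated objective: faster
-- what changed: Replaces A's per-element nested rescans with two sweeps (forward and backward) that maintain a sorted list of the elements seen so far, using hand-written binary search to count earlier-larger (bisect_right) and later-smaller (bisect_left) elements directly.
import Mathlib
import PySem

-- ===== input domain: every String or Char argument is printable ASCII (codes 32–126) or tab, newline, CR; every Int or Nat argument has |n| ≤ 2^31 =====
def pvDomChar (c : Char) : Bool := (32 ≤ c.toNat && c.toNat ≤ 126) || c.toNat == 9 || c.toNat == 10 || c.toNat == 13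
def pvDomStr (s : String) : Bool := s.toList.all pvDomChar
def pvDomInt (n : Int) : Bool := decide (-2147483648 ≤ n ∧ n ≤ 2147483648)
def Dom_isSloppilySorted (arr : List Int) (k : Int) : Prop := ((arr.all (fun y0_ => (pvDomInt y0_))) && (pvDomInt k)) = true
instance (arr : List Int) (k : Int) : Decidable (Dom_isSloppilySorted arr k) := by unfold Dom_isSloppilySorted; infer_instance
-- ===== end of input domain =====

-- B replaces A's per-element nested rescans with two sweeps over a sorted auxiliary
-- list using binary search (bisect) to count earlier-larger / later-smaller elements.

-- ===== PORT A =====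
-- outer 'for i in range(len(arr))' with early 'return False'
def pvLoopA (arr : List Int) (k : Int) : List Int → Bool
  | [] => true
  | i :: rest =>
    -- for j in range(i): if arr[j] > arr[i]: countbefore += 1
    let countbefore : Int := (PySem.List.pyRange 0 i 1).foldl
      (fun c j => if PySem.List.pyGetD arr j 0 > PySem.List.pyGetD arr i 0 then c + 1 else c) 0
    -- for j in range(i, len(arr)): if arr[j] < arr[i]: countafter += 1
    let countafter : Int := (PySem.List.pyRange i (arr.length : Int) 1).foldl
      (fun c j => if PySem.List.pyGetD arr j 0 < PySem.List.pyGetD arr i 0 then c + 1 else c) 0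
    if countbefore > k ∨ countafter > k then false else pvLoopA arr k rest

def isSloppilySorted (arr : List Int) (k : Int) : Bool :=
  pvLoopA arr k (PySem.List.pyRange 0 (arr.length : Int) 1)

-- ===== PORT B =====
-- forward sweep: Source B's hand-written _bisect_right is exactly CPython's bisect_right
-- loop, ported as PySem.List.bisectRight; then check, then seen[pos:pos] = [x]
def pvForward (k : Int) : List Int → List Int → Bool
  | [], _ => true
  | x :: rest, seen =>
    let pos := PySem.List.bisectRight seen x
    if (seen.length : Int) - (pos : Int) > k then false
    else pvForward k rest (seen.take pos ++ x :: seen.drop pos)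

-- backward sweep over reversed(arr): _bisect_left = PySem.List.bisectLeft
def pvBackward (k : Int) : List Int → List Int → Bool
  | [], _ => true
  | x :: rest, seen =>
    let pos := PySem.List.bisectLeft seen x
    if (pos : Int) > k then false
    else pvBackward k rest (seen.take pos ++ x :: seen.drop pos)

def isSloppilySorted_alt (arr : List Int) (k : Int) : Bool :=
  pvForward k arr [] && pvBackward k arr.reverse []

-- ===== PRECONDITION & SPEC =====
def Spec_isSloppilySorted (arr : List Int) (k : Int) (out : Bool) : Prop := out = isSloppilySorted_alt arr k
instance (arr : List Int) (k : Int) (out : Bool) : Decidable (Spec_isSloppilySorted arr k out) := by unfold Spec_isSloppilySorted; infer_instance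

-- ===== CLAIM (what is proved, stated in full; the proofs are below) =====
def Claim_equal_isSloppilySorted : Prop := ∀ (arr : List Int) (k : Int), Dom_isSloppilySorted arr k → Spec_isSloppilySorted arr k (isSloppilySorted arr k)

-- ===== LEMMAS AND PROOFS =====

-- the common specification: some element follows more than k larger values
-- (BadBefore) or precedes more than k smaller values (BadAfter)
def BadBefore (arr : List Int) (k : Int) : Prop :=
  ∃ u x v, arr = u ++ x :: v ∧ k < (u.countP (fun y => x < y) : Int)

def BadAfter (arr : List Int) (k : Int) : Prop :=
  ∃ u x v, arr = u ++ x :: v ∧ k < (v.countP (fun y => y < x) : Int)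

-- ---- A-side characterisation ----

theorem pvLoopA_false_iff (arr : List Int) (k : Int) (l : List Int) :
    pvLoopA arr k l = false ↔ ∃ i ∈ l,
      k < (PySem.List.pyRange 0 i 1).foldl
        (fun c j => if PySem.List.pyGetD arr j 0 > PySem.List.pyGetD arr i 0 then c + 1 else c) (0:Int)
      ∨ k < (PySem.List.pyRange i (arr.length : Int) 1).foldl
        (fun c j => if PySem.List.pyGetD arr j 0 < PySem.List.pyGetD arr i 0 then c + 1 else c) (0:Int) := by
  induction l with
  | nil => simp [pvLoopA]
  | cons i rest ih =>
    simp only [pvLoopA]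
    split
    · next h =>
      simp only [List.mem_cons]
      constructor
      · intro _; exact ⟨i, Or.inl rfl, h⟩
      · intro _; trivial
    · next h =>
      rw [ih]
      constructor
      · rintro ⟨j, hj, hcond⟩; exact ⟨j, List.mem_cons_of_mem _ hj, hcond⟩
      · rintro ⟨j, hj, hcond⟩
        rcases List.mem_cons.mp hj with rfl | hj'
        · exact absurd hcond h
        · exact ⟨j, hj', hcond⟩

theorem cb_eq_countP (arr : List Int) (i : Nat) (hi : i < arr.length) :
    (PySem.List.pyRange 0 (i:Int) 1).foldl
      (fun c j => if PySem.List.pyGetD arr j 0 > PySem.List.pyGetD arr (i:Int) 0 then c + 1 else c) (0:Int)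
    = ((arr.take i).countP (fun y => arr[i] < y) : Int) := by
  have hx : PySem.List.pyGetD arr (i:Int) 0 = arr[i] := by
    rw [PySem.List.pyGetD_eq_getElem arr 0 (by positivity) (by exact_mod_cast hi)]
    simp
  have hmap : (PySem.List.pyRange 0 (i:Int) 1).map (fun j => PySem.List.pyGetD arr j 0)
      = arr.take i := by
    rw [PySem.List.pyRange_one]
    rw [List.map_map]
    apply List.ext_getElem
    · simp [Nat.min_eq_left (le_of_lt hi)]
    · intro n h1 h2
      simp only [List.getElem_map, List.getElem_range, Function.comp_apply, List.getElem_take]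
      rw [show ((0:Int) + (n:Int)) = ((n:Nat):Int) by ring]
      rw [PySem.List.pyGetD_eq_getElem arr 0 (by positivity)
        (by simp at h1; omega)]
      simp
  rw [PySem.List.foldl_ite_add_one]
  rw [zero_add]
  rw [← hmap, List.countP_map]
  congr 1
  apply List.countP_congr
  intro j _
  simp [hx]

theorem ca_eq_countP (arr : List Int) (i : Nat) (hi : i < arr.length) :
    (PySem.List.pyRange (i:Int) (arr.length : Int) 1).foldl
      (fun c j => if PySem.List.pyGetD arr j 0 < PySem.List.pyGetD arr (i:Int) 0 then c + 1 else c) (0:Int)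
    = ((arr.drop i).countP (fun y => y < arr[i]) : Int) := by
  have hx : PySem.List.pyGetD arr (i:Int) 0 = arr[i] := by
    rw [PySem.List.pyGetD_eq_getElem arr 0 (by positivity) (by exact_mod_cast hi)]
    simp
  rw [hx]
  rw [PySem.List.foldl_pyRange_pyGetD' arr 0
    (fun c y => if y < arr[i] then c + 1 else c) 0 (by positivity)]
  rw [PySem.List.foldl_ite_add_one]
  simp

theorem exists_cb_iff (arr : List Int) (k : Int) :
    (∃ m : Nat, ∃ _ : m < arr.length, k < ((arr.take m).countP (fun y => arr[m] < y) : Int))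
    ↔ BadBefore arr k := by
  constructor
  · rintro ⟨m, h, hk⟩
    refine ⟨arr.take m, arr[m], arr.drop (m+1), ?_, hk⟩
    conv_lhs => rw [← List.take_append_drop m arr]
    congr 1
    exact (List.getElem_cons_drop h).symm
  · rintro ⟨u, x, v, he, hk⟩
    subst he
    refine ⟨u.length, by simp, ?_⟩
    simpa using hk

theorem exists_ca_iff (arr : List Int) (k : Int) :
    (∃ m : Nat, ∃ _ : m < arr.length, k < ((arr.drop m).countP (fun y => y < arr[m]) : Int))
    ↔ BadAfter arr k := by
  constructor
  · rintro ⟨m, h, hk⟩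
    refine ⟨arr.take m, arr[m], arr.drop (m+1), ?_, ?_⟩
    · conv_lhs => rw [← List.take_append_drop m arr]
      congr 1
      exact (List.getElem_cons_drop h).symm
    · have hc : (arr.drop m).countP (fun y => decide (y < arr[m]))
          = (arr.drop (m+1)).countP (fun y => decide (y < arr[m])) := by
        conv_lhs => rw [← List.getElem_cons_drop h]
        rw [List.countP_cons]
        simp
      rw [hc] at hk
      exact hk
  · rintro ⟨u, x, v, he, hk⟩
    subst he
    refine ⟨u.length, by simp, ?_⟩
    have hd : (u ++ x :: v).drop u.length = x :: v := by simp
    have hg : (u ++ x :: v)[u.length]'(by simp) = x := by simp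
    rw [hd, hg]
    simpa [List.countP_cons] using hk

theorem A_false_iff (arr : List Int) (k : Int) :
    isSloppilySorted arr k = false ↔ BadBefore arr k ∨ BadAfter arr k := by
  unfold isSloppilySorted
  rw [pvLoopA_false_iff]
  rw [← exists_cb_iff arr k, ← exists_ca_iff arr k]
  constructor
  · rintro ⟨i, hi, hcond⟩
    rw [PySem.List.mem_pyRange_one] at hi
    obtain ⟨h0, h1⟩ := hi
    have hmi : ((i.toNat : Nat) : Int) = i := Int.toNat_of_nonneg h0
    have hlt : i.toNat < arr.length := by omega
    rw [← hmi] at hcond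
    rw [cb_eq_countP arr i.toNat hlt, ca_eq_countP arr i.toNat hlt] at hcond
    rcases hcond with h | h
    · exact Or.inl ⟨i.toNat, hlt, h⟩
    · exact Or.inr ⟨i.toNat, hlt, h⟩
  · intro hcase
    rcases hcase with ⟨m, hlt, h⟩ | ⟨m, hlt, h⟩
    · refine ⟨(m:Int), PySem.List.mem_pyRange_one.mpr ⟨by positivity, by exact_mod_cast hlt⟩, ?_⟩
      exact Or.inl (by rw [cb_eq_countP arr m hlt]; exact h)
    · refine ⟨(m:Int), PySem.List.mem_pyRange_one.mpr ⟨by positivity, by exact_mod_cast hlt⟩, ?_⟩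
      exact Or.inr (by rw [ca_eq_countP arr m hlt]; exact h)

-- ---- B-side: bisect counting and sorted insertion ----

theorem bisectRight_countP (seen : List Int) (x : Int) (hs : seen.Pairwise (· ≤ ·)) :
    seen.countP (fun y => decide (x < y)) = seen.length - PySem.List.bisectRight seen x := by
  obtain ⟨hle, hlo, hhi⟩ := PySem.List.bisectRight_spec seen x hs
  conv_lhs => rw [← List.take_append_drop (PySem.List.bisectRight seen x) seen]
  rw [List.countP_append]
  have h1 : (seen.take (PySem.List.bisectRight seen x)).countP (fun y => decide (x < y)) = 0 := by
    rw [List.countP_eq_zero]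
    intro a ha
    obtain ⟨j, hj, rfl⟩ := List.mem_take_iff_getElem.mp ha
    have := hlo j (by omega) (by omega)
    simp
    omega
  have h2 : (seen.drop (PySem.List.bisectRight seen x)).countP (fun y => decide (x < y))
      = (seen.drop (PySem.List.bisectRight seen x)).length := by
    rw [List.countP_eq_length]
    intro a ha
    obtain ⟨j, hj, rfl⟩ := List.mem_drop_iff_getElem.mp ha
    have := hhi (PySem.List.bisectRight seen x + j) (by omega) (by omega)
    simpa
  rw [h1, h2, List.length_drop]
  omega

theorem bisectLeft_countP (seen : List Int) (x : Int) (hs : seen.Pairwise (· ≤ ·)) :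
    seen.countP (fun y => decide (y < x)) = PySem.List.bisectLeft seen x := by
  obtain ⟨hle, hlo, hhi⟩ := PySem.List.bisectLeft_spec seen x hs
  conv_lhs => rw [← List.take_append_drop (PySem.List.bisectLeft seen x) seen]
  rw [List.countP_append]
  have h1 : (seen.take (PySem.List.bisectLeft seen x)).countP (fun y => decide (y < x))
      = (seen.take (PySem.List.bisectLeft seen x)).length := by
    rw [List.countP_eq_length]
    intro a ha
    obtain ⟨j, hj, rfl⟩ := List.mem_take_iff_getElem.mp ha
    have := hlo j (by omega) (by omega)
    simpa
  have h2 : (seen.drop (PySem.List.bisectLeft seen x)).countP (fun y => decide (y < x)) = 0 := by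
    rw [List.countP_eq_zero]
    intro a ha
    obtain ⟨j, hj, rfl⟩ := List.mem_drop_iff_getElem.mp ha
    have := hhi (PySem.List.bisectLeft seen x + j) (by omega) (by omega)
    simp
    omega
  rw [h1, h2, List.length_take]
  omega

theorem insert_sorted (seen : List Int) (x : Int) (pos : Nat)
    (hs : seen.Pairwise (· ≤ ·))
    (hlo : ∀ (j : Nat) (hj : j < seen.length), j < pos → seen[j] ≤ x)
    (hhi : ∀ (j : Nat) (hj : j < seen.length), pos ≤ j → x ≤ seen[j]) :
    (seen.take pos ++ x :: seen.drop pos).Pairwise (· ≤ ·) := by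
  rw [List.pairwise_append]
  refine ⟨hs.sublist (List.take_sublist _ _), ?_, ?_⟩
  · rw [List.pairwise_cons]
    refine ⟨?_, hs.sublist (List.drop_sublist _ _)⟩
    intro b hb
    obtain ⟨j, hj, rfl⟩ := List.mem_drop_iff_getElem.mp hb
    exact hhi (pos + j) (by omega) (by omega)
  · intro a ha b hb
    obtain ⟨j, hj, rfl⟩ := List.mem_take_iff_getElem.mp ha
    have hax : seen[j] ≤ x := hlo j (by omega) (by omega)
    rcases List.mem_cons.mp hb with rfl | hb'
    · exact hax
    · obtain ⟨j', hj', rfl⟩ := List.mem_drop_iff_getElem.mp hb'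
      exact le_trans hax (hhi (pos + j') (by omega) (by omega))

-- ---- B-side sweep characterisations ----

theorem pvForward_false_iff (k : Int) (rest : List Int) : ∀ seen : List Int,
    seen.Pairwise (· ≤ ·) →
    (pvForward k rest seen = false ↔
      ∃ u x v, rest = u ++ x :: v ∧ k < ((seen ++ u).countP (fun y => x < y) : Int)) := by
  induction rest with
  | nil =>
    intro seen _
    simp only [pvForward]
    constructor
    · intro h; exact absurd h (by simp)
    · rintro ⟨u, x, v, he, -⟩; exact absurd he (by simp)
  | cons x rest ih =>
    intro seen hs
    obtain ⟨hle, hlo, hhi⟩ := PySem.List.bisectRight_spec seen x hs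
    have hcount := bisectRight_countP seen x hs
    simp only [pvForward]
    split
    · next h =>
      constructor
      · intro _
        refine ⟨[], x, rest, by simp, ?_⟩
        rw [List.append_nil, hcount]
        omega
      · intro _; trivial
    · next h =>
      have hs' := insert_sorted seen x (PySem.List.bisectRight seen x) hs hlo
        (fun j hj hge => le_of_lt (hhi j hj hge))
      rw [ih _ hs']
      have hcp : ∀ (p : Int → Bool) (u : List Int),
          ((seen.take (PySem.List.bisectRight seen x) ++ x :: seen.drop (PySem.List.bisectRight seen x)) ++ u).countP p
          = (seen ++ x :: u).countP p := by
        intro p u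
        have h3 : (seen.take (PySem.List.bisectRight seen x)).countP p + (seen.drop (PySem.List.bisectRight seen x)).countP p
            = seen.countP p := by
          rw [← List.countP_append, List.take_append_drop]
        simp only [List.countP_cons, List.countP_append]
        omega
      constructor
      · rintro ⟨u, y, v, rfl, hk⟩
        refine ⟨x :: u, y, v, rfl, ?_⟩
        rw [← hcp _ u]
        exact hk
      · rintro ⟨u, y, v, he, hk⟩
        cases u with
        | nil =>
          obtain ⟨rfl, rfl⟩ : y = x ∧ rest = v := by
            simp only [List.nil_append, List.cons.injEq] at he
            exact ⟨he.1.symm, he.2⟩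
          exact absurd hk (by rw [List.append_nil, hcount]; omega)
        | cons a u' =>
          obtain ⟨rfl, he'⟩ : a = x ∧ rest = u' ++ y :: v := by
            simp only [List.cons_append, List.cons.injEq] at he
            exact ⟨he.1.symm, he.2⟩
          refine ⟨u', y, v, he', ?_⟩
          rw [hcp _ u']
          exact hk

theorem pvBackward_false_iff (k : Int) (rest : List Int) : ∀ seen : List Int,
    seen.Pairwise (· ≤ ·) →
    (pvBackward k rest seen = false ↔
      ∃ u x v, rest = u ++ x :: v ∧ k < ((seen ++ u).countP (fun y => y < x) : Int)) := by
  induction rest with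
  | nil =>
    intro seen _
    simp only [pvBackward]
    constructor
    · intro h; exact absurd h (by simp)
    · rintro ⟨u, x, v, he, -⟩; exact absurd he (by simp)
  | cons x rest ih =>
    intro seen hs
    obtain ⟨hle, hlo, hhi⟩ := PySem.List.bisectLeft_spec seen x hs
    have hcount := bisectLeft_countP seen x hs
    simp only [pvBackward]
    split
    · next h =>
      constructor
      · intro _
        refine ⟨[], x, rest, by simp, ?_⟩
        rw [List.append_nil, hcount]
        omega
      · intro _; trivial
    · next h =>
      have hs' := insert_sorted seen x (PySem.List.bisectLeft seen x) hs
        (fun j hj hltp => le_of_lt (hlo j hj hltp)) hhi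
      rw [ih _ hs']
      have hcp : ∀ (p : Int → Bool) (u : List Int),
          ((seen.take (PySem.List.bisectLeft seen x) ++ x :: seen.drop (PySem.List.bisectLeft seen x)) ++ u).countP p
          = (seen ++ x :: u).countP p := by
        intro p u
        have h3 : (seen.take (PySem.List.bisectLeft seen x)).countP p + (seen.drop (PySem.List.bisectLeft seen x)).countP p
            = seen.countP p := by
          rw [← List.countP_append, List.take_append_drop]
        simp only [List.countP_cons, List.countP_append]
        omega
      constructor
      · rintro ⟨u, y, v, rfl, hk⟩
        refine ⟨x :: u, y, v, rfl, ?_⟩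
        rw [← hcp _ u]
        exact hk
      · rintro ⟨u, y, v, he, hk⟩
        cases u with
        | nil =>
          obtain ⟨rfl, rfl⟩ : y = x ∧ rest = v := by
            simp only [List.nil_append, List.cons.injEq] at he
            exact ⟨he.1.symm, he.2⟩
          exact absurd hk (by rw [List.append_nil, hcount]; omega)
        | cons a u' =>
          obtain ⟨rfl, he'⟩ : a = x ∧ rest = u' ++ y :: v := by
            simp only [List.cons_append, List.cons.injEq] at he
            exact ⟨he.1.symm, he.2⟩
          refine ⟨u', y, v, he', ?_⟩
          rw [hcp _ u']
          exact hk

theorem B_false_iff (arr : List Int) (k : Int) :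
    isSloppilySorted_alt arr k = false ↔ BadBefore arr k ∨ BadAfter arr k := by
  unfold isSloppilySorted_alt
  rw [Bool.and_eq_false_iff]
  rw [pvForward_false_iff k arr [] (by simp), pvBackward_false_iff k arr.reverse [] (by simp)]
  simp only [List.nil_append]
  constructor
  · rintro (⟨u, x, v, he, hk⟩ | ⟨u, x, v, he, hk⟩)
    · exact Or.inl ⟨u, x, v, he, hk⟩
    · refine Or.inr ⟨v.reverse, x, u.reverse, ?_, ?_⟩
      · rw [List.reverse_eq_iff] at he
        simpa using he
      · rw [List.countP_reverse]
        exact hk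
  · rintro (⟨u, x, v, he, hk⟩ | ⟨u, x, v, he, hk⟩)
    · exact Or.inl ⟨u, x, v, he, hk⟩
    · refine Or.inr ⟨v.reverse, x, u.reverse, ?_, ?_⟩
      · subst he; simp
      · rw [List.countP_reverse]
        exact hk

-- ===== VERDICT (by name: the statement is the Claim_ definition above) =====
theorem isSloppilySorted_spec : Claim_equal_isSloppilySorted := by
  intro arr k _
  unfold Spec_isSloppilySorted
  have hA := A_false_iff arr k
  have hB := B_false_iff arr k
  cases hia : isSloppilySorted arr k <;> cases hib : isSloppilySorted_alt arr k <;> simp_all
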